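-- pv_equiv track=rewrite | github.com/EtherCS/arete | benchmark/benchmark/logs.py | _merge_arete_round_results
-- ===== SOURCE A (Python) =====
-- def _merge_arete_round_results(input):
--     # Keep the earliest timestamp.
--     merged = {}
--     digest_to_time = {}
--     for x in input:
--         for s, d, r, t in x:
--             if int(s) == 0:
--                 if not d in digest_to_time or digest_to_time[d] > t:
--                 # if not k in merged or merged[k] > r:
--                     digest_to_time[d] = t
--                     merged[d] = r
--     return merged
-- ===== SOURCE B (Python) =====
-- def _merge_arete_round_results(input):
--     # Two-phase: group (t, r) pairs per digest in encounter order, then take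
--     # the first-minimal timestamp's r for each digest.
--     groups = {}
--     for x in input:
--         for s, d, r, t in x:
--             if int(s) == 0:
--                 groups[d] = groups.get(d, []) + [(t, r)]
--     return {d: min(g, key=lambda p: p[0])[1] for d, g in groups.items()}
-- ===== Notes on version B (the rewrite author's own statement) =====
-- stated objective: alternative
-- what changed: Replaces the running-min-while-scanning over two parallel dicts with a two-phase shape: first group all (t, r) pairs per digest in encounter order, then reduce each group with min() on the timestamp (first minimal wins, matching A's strict-> tie-break).
import Mathlib
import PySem

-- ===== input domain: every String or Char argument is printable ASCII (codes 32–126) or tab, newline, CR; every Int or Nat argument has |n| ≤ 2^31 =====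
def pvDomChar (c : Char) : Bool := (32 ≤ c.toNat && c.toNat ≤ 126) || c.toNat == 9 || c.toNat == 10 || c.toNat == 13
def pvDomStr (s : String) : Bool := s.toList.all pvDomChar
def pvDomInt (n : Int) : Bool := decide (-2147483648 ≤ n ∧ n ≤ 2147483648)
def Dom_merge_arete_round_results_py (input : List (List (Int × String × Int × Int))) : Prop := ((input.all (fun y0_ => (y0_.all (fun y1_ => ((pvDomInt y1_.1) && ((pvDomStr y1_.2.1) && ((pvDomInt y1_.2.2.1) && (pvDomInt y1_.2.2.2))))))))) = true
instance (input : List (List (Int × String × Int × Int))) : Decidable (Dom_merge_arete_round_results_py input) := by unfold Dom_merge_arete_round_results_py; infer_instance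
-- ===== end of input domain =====

-- B replaces A's running-min scan (two parallel dicts updated in place) by a two-phase
-- group-per-digest-then-reduce-with-min shape; return value only, no mutation involved.

-- ===== PORT A =====
-- step of A's inner loop: `if int(s) == 0: if not d in digest_to_time or digest_to_time[d] > t: ...`
-- (the `not in`/`[]` pair is ported through one `get?` match: none = not in, some v = digest_to_time[d])
def pvAStep (st : PySem.Dict String Int × PySem.Dict String Int) (e : Int × String × Int × Int) :
    PySem.Dict String Int × PySem.Dict String Int :=
  if e.1 == 0 then
    match st.2.get? e.2.1 with
    | none => (st.1.insert e.2.1 e.2.2.1, st.2.insert e.2.1 e.2.2.2)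
    | some v => if v > e.2.2.2 then (st.1.insert e.2.1 e.2.2.1, st.2.insert e.2.1 e.2.2.2) else st
  else st

def merge_arete_round_results_py (input : List (List (Int × String × Int × Int))) : List (String × Int) :=
  ((input.foldl (fun st x => x.foldl pvAStep st) (PySem.Dict.empty, PySem.Dict.empty)).1).items

-- ===== PORT B =====
-- step of B's grouping loop: `groups[d] = groups.get(d, []) + [(t, r)]`
def pvBStep (g : PySem.Dict String (List (Int × Int))) (e : Int × String × Int × Int) :
    PySem.Dict String (List (Int × Int)) :=
  if e.1 == 0 then g.insert e.2.1 (g.getD e.2.1 [] ++ [(e.2.2.2, e.2.2.1)]) else g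

-- `min(g, key=lambda p: p[0])[1]`; groups are never empty, so the `none` arm is unreachable
def pvBest (g : List (Int × Int)) : Int :=
  match PySem.List.min? g (fun p => p.1) with
  | some m => m.2
  | none => 0

def merge_arete_round_results_py_alt (input : List (List (Int × String × Int × Int))) : List (String × Int) :=
  let groups := input.foldl (fun g x => x.foldl pvBStep g) PySem.Dict.empty
  (groups.items.foldl (fun m p => m.insert p.1 (pvBest p.2)) PySem.Dict.empty).items

-- ===== PRECONDITION & SPEC =====
def Spec_merge_arete_round_results_py (input : List (List (Int × String × Int × Int))) (out : List (String × Int)) : Prop := out = merge_arete_round_results_py_alt input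
instance (input : List (List (Int × String × Int × Int))) (out : List (String × Int)) : Decidable (Spec_merge_arete_round_results_py input out) := by unfold Spec_merge_arete_round_results_py; infer_instance

-- ===== CLAIM (what is proved, stated in full; the proofs are below) =====
def Claim_equal_merge_arete_round_results_py : Prop := ∀ (input : List (List (Int × String × Int × Int))), Dom_merge_arete_round_results_py input → Spec_merge_arete_round_results_py input (merge_arete_round_results_py input)

-- ===== LEMMAS AND PROOFS =====

-- timestamp of the group's first-minimal pair (proof-side companion of pvBest)
def pvBestT (g : List (Int × Int)) : Int :=
  match PySem.List.min? g (fun p => p.1) with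
  | some m => m.1
  | none => 0

-- invariant tying A's two running dicts to B's groups dict
def pvInv (g : PySem.Dict String (List (Int × Int)))
    (st : PySem.Dict String Int × PySem.Dict String Int) : Prop :=
  g.keys.Nodup ∧
  st.1.items = g.items.map (fun p => (p.1, pvBest p.2)) ∧
  st.2.items = g.items.map (fun p => (p.1, pvBestT p.2)) ∧
  ∀ p ∈ g.items, p.2 ≠ []

theorem pv_min?_append_singleton (xs : List (Int × Int)) (y : Int × Int) :
    PySem.List.min? (xs ++ [y]) (fun p => p.1) =
      match PySem.List.min? xs (fun p => p.1) with
      | none => some y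
      | some m => if y.1 < m.1 then some y else some m := by
  cases hacc : PySem.List.min? xs (fun p => p.1) with
  | none =>
    simp only [PySem.List.min?] at hacc ⊢
    rw [List.foldl_append, hacc]
    rfl
  | some m =>
    simp only [PySem.List.min?] at hacc ⊢
    rw [List.foldl_append, hacc]
    rfl

theorem pvInv_empty : pvInv PySem.Dict.empty (PySem.Dict.empty, PySem.Dict.empty) := by
  refine ⟨?_, ?_, ?_, ?_⟩ <;> simp [PySem.Dict.empty, PySem.Dict.keys]

theorem pvInv_step (g : PySem.Dict String (List (Int × Int)))
    (st : PySem.Dict String Int × PySem.Dict String Int)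
    (h : pvInv g st) (e : Int × String × Int × Int) :
    pvInv (pvBStep g e) (pvAStep st e) := by
  obtain ⟨hnd, h1, h2, hne⟩ := h
  by_cases hs : e.1 == 0
  · -- element is kept; d := e.2.1, r := e.2.2.1, t := e.2.2.2
    simp only [pvBStep, pvAStep, hs, if_true]
    set d := e.2.1 with hd
    set r := e.2.2.1 with hr
    set t := e.2.2.2 with ht
    have hkeys1 : st.1.keys = g.keys := by
      simp only [PySem.Dict.keys, h1, List.map_map]; rfl
    have hkeys2 : st.2.keys = g.keys := by
      simp only [PySem.Dict.keys, h2, List.map_map]; rfl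
    by_cases hc : g.contains d = true
    · -- d already has a group
      have hsome : (g.get? d).isSome := by
        rw [← PySem.Dict.contains_eq_isSome_get?]; exact hc
      obtain ⟨grp, hget⟩ := Option.isSome_iff_exists.mp hsome
      have hmem : (d, grp) ∈ g.items := PySem.Dict.mem_items_of_get?_eq_some _ hget
      have hgetD : g.getD d [] = grp := PySem.Dict.getD_of_get?_eq_some _ _ hget
      have hc1 : st.1.contains d = true := by
        rw [PySem.Dict.contains_iff_mem_keys, hkeys1]
        exact PySem.Dict.mem_keys_of_mem_items _ hmem
      have hc2 : st.2.contains d = true := by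
        rw [PySem.Dict.contains_iff_mem_keys, hkeys2]
        exact PySem.Dict.mem_keys_of_mem_items _ hmem
      have hnd2 : st.2.keys.Nodup := by rw [hkeys2]; exact hnd
      have hget2 : st.2.get? d = some (pvBestT grp) := by
        refine PySem.Dict.get?_of_mem_items _ ?_ hnd2
        rw [h2]
        exact List.mem_map_of_mem hmem
      have hgrpne : grp ≠ [] := hne _ hmem
      obtain ⟨m, hm⟩ : ∃ m, PySem.List.min? grp (fun p => p.1) = some m := by
        cases hmin : PySem.List.min? grp (fun p => p.1) with
        | none => exact absurd ((PySem.List.min?_eq_none_iff _ _).mp hmin) hgrpne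
        | some m => exact ⟨m, rfl⟩
      have hT : pvBestT grp = m.1 := by simp [pvBestT, hm]
      have hB : pvBest grp = m.2 := by simp [pvBest, hm]
      have hminapp : PySem.List.min? (grp ++ [(t, r)]) (fun p => p.1) =
          if t < m.1 then some (t, r) else some m := by
        rw [pv_min?_append_singleton, hm]
      have huniq : ∀ q ∈ g.items, q.1 = d → q.2 = grp := by
        intro q hq hqd
        have hq' : (q.1, q.2) ∈ g.items := by simpa using hq
        have := PySem.Dict.get?_of_mem_items _ hq' hnd
        rw [hqd, hget] at this
        exact (Option.some.inj this).symm
      have hndB : (g.insert d (g.getD d [] ++ [(t, r)])).keys.Nodup := by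
        rw [PySem.Dict.keys_insert_of_contains _ _ hc]; exact hnd
      have hneB : ∀ p ∈ (g.insert d (g.getD d [] ++ [(t, r)])).items, p.2 ≠ [] := by
        rw [PySem.Dict.items_insert_of_contains _ _ hc]
        intro p hp
        obtain ⟨q, hq, hpq⟩ := List.mem_map.mp hp
        by_cases hqd : q.1 == d
        · simp only [hqd, if_true] at hpq
          subst hpq; simp
        · simp only [hqd] at hpq
          subst hpq; exact hne _ hq
      rw [hget2]
      by_cases hlt : t < m.1
      · have hcond : pvBestT grp > t := by rw [hT]; exact hlt
        simp only [hcond, if_true]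
        refine ⟨hndB, ?_, ?_, hneB⟩
        · rw [PySem.Dict.items_insert_of_contains _ _ hc1,
              PySem.Dict.items_insert_of_contains _ _ hc, h1,
              List.map_map, List.map_map]
          refine List.map_congr_left ?_
          intro q hq
          by_cases hqd : q.1 == d
          · simp only [Function.comp, hqd, if_true]
            have : pvBest (g.getD d [] ++ [(t, r)]) = r := by
              simp [pvBest, hgetD, hminapp, hlt]
            simp [this]
          · simp [Function.comp, hqd]
        · rw [PySem.Dict.items_insert_of_contains _ _ hc2,
              PySem.Dict.items_insert_of_contains _ _ hc, h2,
              List.map_map, List.map_map]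
          refine List.map_congr_left ?_
          intro q hq
          by_cases hqd : q.1 == d
          · simp only [Function.comp, hqd, if_true]
            have : pvBestT (g.getD d [] ++ [(t, r)]) = t := by
              simp [pvBestT, hgetD, hminapp, hlt]
            simp [this]
          · simp [Function.comp, hqd]
      · have hcond : ¬ pvBestT grp > t := by rw [hT]; exact hlt
        simp only [hcond, if_false]
        refine ⟨hndB, ?_, ?_, hneB⟩
        · rw [PySem.Dict.items_insert_of_contains _ _ hc, h1, List.map_map]
          refine (List.map_congr_left ?_).symm
          intro q hq
          by_cases hqd : q.1 == d
          · have hq2 : q.2 = grp := huniq q hq (by simpa using hqd)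
            have : pvBest (g.getD d [] ++ [(t, r)]) = pvBest grp := by
              simp [pvBest, hgetD, hminapp, hlt, hm]
            simp only [Function.comp, hqd, if_true, this, hq2]
            have hq1 : q.1 = d := by simpa using hqd
            rw [hq1]
          · simp [Function.comp, hqd]
        · rw [PySem.Dict.items_insert_of_contains _ _ hc, h2, List.map_map]
          refine (List.map_congr_left ?_).symm
          intro q hq
          by_cases hqd : q.1 == d
          · have hq2 : q.2 = grp := huniq q hq (by simpa using hqd)
            have : pvBestT (g.getD d [] ++ [(t, r)]) = pvBestT grp := by
              simp [pvBestT, hgetD, hminapp, hlt, hm]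
            simp only [Function.comp, hqd, if_true, this, hq2]
            have hq1 : q.1 = d := by simpa using hqd
            rw [hq1]
          · simp [Function.comp, hqd]
    · -- d is new
      have hcf : g.contains d = false := by simpa using hc
      have hdk : d ∉ g.keys := by
        rw [← PySem.Dict.contains_iff_mem_keys]; simp [hcf]
      have hget2 : st.2.get? d = none := by
        rw [PySem.Dict.get?_eq_none_iff_not_mem_keys, hkeys2]; exact hdk
      have hc1 : st.1.contains d = false := by
        rw [← Bool.not_eq_true, PySem.Dict.contains_iff_mem_keys, hkeys1]; exact hdk
      have hc2 : st.2.contains d = false := by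
        rw [← Bool.not_eq_true, PySem.Dict.contains_iff_mem_keys, hkeys2]; exact hdk
      have hgetD : g.getD d [] = [] := PySem.Dict.getD_of_not_contains _ _ hcf
      rw [hget2]
      refine ⟨?_, ?_, ?_, ?_⟩
      · rw [PySem.Dict.keys_insert_of_not_contains _ _ hcf]
        simp [List.nodup_append, hnd]
        exact fun a ha h => hdk (h ▸ ha)
      · rw [PySem.Dict.items_insert_of_not_contains _ _ hc1,
            PySem.Dict.items_insert_of_not_contains _ _ hcf, h1, hgetD]
        simp [pvBest, PySem.List.min?]
      · rw [PySem.Dict.items_insert_of_not_contains _ _ hc2,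
            PySem.Dict.items_insert_of_not_contains _ _ hcf, h2, hgetD]
        simp [pvBestT, PySem.List.min?]
      · rw [PySem.Dict.items_insert_of_not_contains _ _ hcf, hgetD]
        intro p hp
        rcases List.mem_append.mp hp with hp | hp
        · exact hne _ hp
        · simp at hp; subst hp; simp
  · simp only [pvBStep, pvAStep, hs]
    exact ⟨hnd, h1, h2, hne⟩

theorem pvInv_foldl (l : List (Int × String × Int × Int))
    (g : PySem.Dict String (List (Int × Int)))
    (st : PySem.Dict String Int × PySem.Dict String Int) (h : pvInv g st) :
    pvInv (l.foldl pvBStep g) (l.foldl pvAStep st) := by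
  induction l generalizing g st with
  | nil => exact h
  | cons e l ih => exact ih _ _ (pvInv_step g st h e)

-- ===== VERDICT (by name: the statement is the Claim_ definition above) =====
theorem merge_arete_round_results_py_spec : Claim_equal_merge_arete_round_results_py := by
  intro input _
  show merge_arete_round_results_py input = merge_arete_round_results_py_alt input
  unfold merge_arete_round_results_py merge_arete_round_results_py_alt
  rw [← List.foldl_flatten, ← List.foldl_flatten]
  obtain ⟨hnd, h1, h2, hne⟩ := pvInv_foldl input.flatten PySem.Dict.empty
    (PySem.Dict.empty, PySem.Dict.empty) pvInv_empty
  set g := input.flatten.foldl pvBStep PySem.Dict.empty with hg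
  rw [h1]
  rw [PySem.Dict.items_foldl_insert_fresh g.items (fun p => p.1) (fun p => pvBest p.2)
        PySem.Dict.empty (fun a _ => PySem.Dict.contains_empty _) (by
          simpa [PySem.Dict.keys] using hnd)]
  simp [PySem.Dict.empty]
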